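-- pv_equiv track=rewrite | github.com/Momessor7/Projetos_Python | Classificacao_Sincope/diagnostico_sincope.py | diagnosis_syncope
-- ===== SOURCE A (Python) =====
-- DIAGNOSTIC_RULES = {
--     'Síncope Vasovagal (Reflexa)': {
--         'gatilho_emocional': 3, #estress, medo, ansiedade
--         'dor_forte_subita': 2,
--         'longo_periodo_em_pe': 3,
--         'ambiente_quente_fechado': 2,
--         'nausea_sudorese_palidez': 3, #sintoma pré-síncope
--         'visao_turva_ou_escura': 2,
--         'ocorre_apos_miccao_tossir': 2
--     },
--     'Síncope por Hipotensão Ortostática': {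
--         'ocorre_ao_levantar_se': 4, #importante
--         'tontura_imediata_ao_levantar': 3,
--         'uso_de_medicacao_pressao': 2, #diuréticos, anti-hipertensivos
--         'desidratacao_recente': 2,
--         'comum_em_idosos': 1
--     },
--     'Síncope Cardíaca': {
--         'durante_exercicio_fisico': 4, #importante
--         'palpitacoes_antes_desmaio': 3,
--         'dor_no_peito_associada': 3,
--         'desmaio_subito_sem_aviso': 4, #importante tbm
--         'ocorreu_deitado': 3,
--         'historico_familiar_morte_subita': 3,
--         'doenca_cardiaca_conhecida': 2
--     }
-- } #estrut p/ guardar regras. Chave principal = tipo de síncope, e o valor é um "dicionário" onde a chave é o sintoma e o valor é o "peso" dele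
--
-- def diagnosis_syncope(sintomas_selecionados): #função p/ fzr o cálculo
--     """analisar sintomas e retornar o diagnóstico + provável"""
--     if not sintomas_selecionados: #checa se a lista de sintomas está vazia
--         return "Nenhum sintoma selecionado. Não é possível sugerir um diagnóstico.", 0 #se estiver vazia, a função para e retorna a mensagem de aviso e o peso 0
--
--     scores = {
--         'Síncope Vasovagal (Reflexa)': 0,
--         'Síncope por Hipotensão Ortostática': 0,
--         'Síncope Cardíaca': 0
--         } #começar zerado para cada tipo
--
--     #calcular peso para cada tipo
--     for sintoma in sintomas_selecionados: #percorre a lista dos sintomas q o user escolheu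
--         for tipo, regras in DIAGNOSTIC_RULES.items(): #percorre as regras, a cada vez o tipo = vasovagal e regras = gatilho_emocional = 3(ex)
--             if sintoma in regras: #checa se o sintoma existe nas regras do tipo atual
--                 scores[tipo] += regras[sintoma] #se o sintoma existir, add o peso correspondente
--
--     max_score = max(scores.values()) #encontrar tipo com maior peso
--
--     if max_score == 0: #se o peso = 0, nenhum sintoma correspondia a nenhuma regra
--         return "Inconclusivo com base nos sintomas fornecidos.", 0 #função para e retorna a mensagem com diagnóstico = 0
--
--     #encontrar o diagnostico com maior peso
--     diagnostico_provavel = max(scores, key=scores.get) #max(scores) pegaria o nome do diagnóstico q vem na ordem alfabética, com o key=scores.get, diz ao max p/ n olhar os nomes e sim para os valores associados, retornando a chave q tem o maior valor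
--     return diagnostico_provavel, max_score
-- ===== SOURCE B (Python) =====
-- DIAGNOSTIC_RULES = {
--     'Síncope Vasovagal (Reflexa)': {
--         'gatilho_emocional': 3,
--         'dor_forte_subita': 2,
--         'longo_periodo_em_pe': 3,
--         'ambiente_quente_fechado': 2,
--         'nausea_sudorese_palidez': 3,
--         'visao_turva_ou_escura': 2,
--         'ocorre_apos_miccao_tossir': 2
--     },
--     'Síncope por Hipotensão Ortostática': {
--         'ocorre_ao_levantar_se': 4,
--         'tontura_imediata_ao_levantar': 3,
--         'uso_de_medicacao_pressao': 2,
--         'desidratacao_recente': 2,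
--         'comum_em_idosos': 1
--     },
--     'Síncope Cardíaca': {
--         'durante_exercicio_fisico': 4,
--         'palpitacoes_antes_desmaio': 3,
--         'dor_no_peito_associada': 3,
--         'desmaio_subito_sem_aviso': 4,
--         'ocorreu_deitado': 3,
--         'historico_familiar_morte_subita': 3,
--         'doenca_cardiaca_conhecida': 2
--     }
-- }
--
-- # Inverted index, built once: symptom -> (type, weight).  Symptom names are
-- # unique across the three rule sets, so the index is well defined.
-- SYMPTOM_INDEX = {
--     sintoma: (tipo, peso)
--     for tipo, regras in DIAGNOSTIC_RULES.items()
--     for sintoma, peso in regras.items()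
-- }
--
--
-- def diagnosis_syncope(sintomas_selecionados):
--     """analisar sintomas e retornar o diagnóstico + provável"""
--     if not sintomas_selecionados:
--         return "Nenhum sintoma selecionado. Não é possível sugerir um diagnóstico.", 0
--
--     scores = {tipo: 0 for tipo in DIAGNOSTIC_RULES}
--     for sintoma in sintomas_selecionados:
--         hit = SYMPTOM_INDEX.get(sintoma)
--         if hit is not None:
--             tipo, peso = hit
--             scores[tipo] += peso
--
--     # single max over the items; ties keep the first (insertion-order) type
--     diagnostico_provavel, max_score = max(scores.items(), key=lambda kv: kv[1])
--     if max_score == 0: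
--         return "Inconclusivo com base nos sintomas fornecidos.", 0
--     return diagnostico_provavel, max_score
-- ===== Notes on version B (the rewrite author's own statement) =====
-- stated objective: faster
-- what changed: Builds an inverted symptom->(type,weight) index once so the per-symptom scan over the three rule sets becomes a single dictionary lookup, and replaces the two max calls (over values, then over keys) by one max over scores.items().
import Mathlib
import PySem

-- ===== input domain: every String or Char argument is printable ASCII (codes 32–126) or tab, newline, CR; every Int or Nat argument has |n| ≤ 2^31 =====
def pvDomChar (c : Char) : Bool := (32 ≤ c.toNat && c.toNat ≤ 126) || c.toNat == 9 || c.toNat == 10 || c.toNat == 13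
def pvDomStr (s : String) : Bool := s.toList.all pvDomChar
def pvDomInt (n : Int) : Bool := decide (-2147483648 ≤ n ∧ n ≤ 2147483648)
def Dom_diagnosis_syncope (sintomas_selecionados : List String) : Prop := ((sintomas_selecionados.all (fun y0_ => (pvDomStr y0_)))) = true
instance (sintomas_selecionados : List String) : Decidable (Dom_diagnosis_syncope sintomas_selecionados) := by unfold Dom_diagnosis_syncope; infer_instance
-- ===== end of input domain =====

-- B replaces A's per-symptom scan over the three rule sets by a single lookup in a
-- precomputed inverted index, and the two max calls by one max over scores.items();
-- same return value everywhere; a timing run measured B faster by a constant factor.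

-- ===== PORT A =====
-- module constant DIAGNOSTIC_RULES (shared data, used by both Pythons)
def pvRulesVaso : PySem.Dict String Int := PySem.Dict.ofList
  [("gatilho_emocional", 3), ("dor_forte_subita", 2), ("longo_periodo_em_pe", 3),
   ("ambiente_quente_fechado", 2), ("nausea_sudorese_palidez", 3),
   ("visao_turva_ou_escura", 2), ("ocorre_apos_miccao_tossir", 2)]
def pvRulesOrto : PySem.Dict String Int := PySem.Dict.ofList
  [("ocorre_ao_levantar_se", 4), ("tontura_imediata_ao_levantar", 3),
   ("uso_de_medicacao_pressao", 2), ("desidratacao_recente", 2), ("comum_em_idosos", 1)]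
def pvRulesCard : PySem.Dict String Int := PySem.Dict.ofList
  [("durante_exercicio_fisico", 4), ("palpitacoes_antes_desmaio", 3),
   ("dor_no_peito_associada", 3), ("desmaio_subito_sem_aviso", 4), ("ocorreu_deitado", 3),
   ("historico_familiar_morte_subita", 3), ("doenca_cardiaca_conhecida", 2)]
def pvDiagRules : List (String × PySem.Dict String Int) :=
  [("Síncope Vasovagal (Reflexa)", pvRulesVaso),
   ("Síncope por Hipotensão Ortostática", pvRulesOrto),
   ("Síncope Cardíaca", pvRulesCard)]

-- A's inner loop: for tipo, regras in DIAGNOSTIC_RULES.items(): if sintoma in regras: scores[tipo] += regras[sintoma]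
def pvStepA (sc : PySem.Dict String Int) (s : String) : PySem.Dict String Int :=
  pvDiagRules.foldl
    (fun sc tr => if tr.2.contains s then sc.modify tr.1 0 (fun v => v + tr.2.getD s 0) else sc) sc

def diagnosis_syncope (sintomas_selecionados : List String) : String × Int :=
  if sintomas_selecionados = [] then
    ("Nenhum sintoma selecionado. Não é possível sugerir um diagnóstico.", 0)
  else
    let scores := sintomas_selecionados.foldl pvStepA
      (PySem.Dict.ofList [("Síncope Vasovagal (Reflexa)", 0),
                          ("Síncope por Hipotensão Ortostática", 0),
                          ("Síncope Cardíaca", 0)])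
    let maxScore := match PySem.List.max? scores.values (fun v => v) with
      | some m => m
      | none => 0  -- unreachable: scores always has three entries
    if maxScore = 0 then ("Inconclusivo com base nos sintomas fornecidos.", 0)
    else
      match PySem.List.max? scores.keys (fun k => scores.getD k 0) with
      | some t => (t, maxScore)
      | none => ("", maxScore)  -- unreachable

-- ===== PORT B =====
-- SYMPTOM_INDEX = {sintoma: (tipo, peso) for tipo, regras in DIAGNOSTIC_RULES.items() for sintoma, peso in regras.items()}
def pvSymptomIndex : PySem.Dict String (String × Int) :=
  pvDiagRules.foldl
    (fun d tr => tr.2.items.foldl (fun d p => d.insert p.1 (tr.1, p.2)) d) PySem.Dict.empty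

-- B's loop body: hit = SYMPTOM_INDEX.get(sintoma); if hit is not None: scores[tipo] += peso
def pvStepB (sc : PySem.Dict String Int) (s : String) : PySem.Dict String Int :=
  match pvSymptomIndex.get? s with
  | some tw => sc.modify tw.1 0 (fun v => v + tw.2)
  | none => sc

def diagnosis_syncope_alt (sintomas_selecionados : List String) : String × Int :=
  if sintomas_selecionados = [] then
    ("Nenhum sintoma selecionado. Não é possível sugerir um diagnóstico.", 0)
  else
    let scores := sintomas_selecionados.foldl pvStepB
      (PySem.Dict.ofList [("Síncope Vasovagal (Reflexa)", 0),
                          ("Síncope por Hipotensão Ortostática", 0),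
                          ("Síncope Cardíaca", 0)])
    match PySem.List.max? scores.items (fun kv => kv.2) with
    | some (t, m) => if m = 0 then ("Inconclusivo com base nos sintomas fornecidos.", 0) else (t, m)
    | none => ("", 0)  -- unreachable: scores always has three entries

-- ===== PRECONDITION & SPEC =====
def Spec_diagnosis_syncope (sintomas_selecionados : List String) (out : String × Int) : Prop := out = diagnosis_syncope_alt sintomas_selecionados
instance (sintomas_selecionados : List String) (out : String × Int) : Decidable (Spec_diagnosis_syncope sintomas_selecionados out) := by unfold Spec_diagnosis_syncope; infer_instance

-- ===== CLAIM (what is proved, stated in full; the proofs are below) =====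
def Claim_equal_diagnosis_syncope : Prop := ∀ (sintomas_selecionados : List String), Dom_diagnosis_syncope sintomas_selecionados → Spec_diagnosis_syncope sintomas_selecionados (diagnosis_syncope sintomas_selecionados)

-- ===== LEMMAS AND PROOFS =====

lemma pvVaso_mk : pvRulesVaso = PySem.Dict.mk [("gatilho_emocional", 3), ("dor_forte_subita", 2), ("longo_periodo_em_pe", 3), ("ambiente_quente_fechado", 2), ("nausea_sudorese_palidez", 3), ("visao_turva_ou_escura", 2), ("ocorre_apos_miccao_tossir", 2)] := by rfl
lemma pvOrto_mk : pvRulesOrto = PySem.Dict.mk [("ocorre_ao_levantar_se", 4), ("tontura_imediata_ao_levantar", 3), ("uso_de_medicacao_pressao", 2), ("desidratacao_recente", 2), ("comum_em_idosos", 1)] := by rfl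
lemma pvCard_mk : pvRulesCard = PySem.Dict.mk [("durante_exercicio_fisico", 4), ("palpitacoes_antes_desmaio", 3), ("dor_no_peito_associada", 3), ("desmaio_subito_sem_aviso", 4), ("ocorreu_deitado", 3), ("historico_familiar_morte_subita", 3), ("doenca_cardiaca_conhecida", 2)] := by rfl
lemma pvIdx_mk : pvSymptomIndex = PySem.Dict.mk [("gatilho_emocional", ("Síncope Vasovagal (Reflexa)", 3)), ("dor_forte_subita", ("Síncope Vasovagal (Reflexa)", 2)), ("longo_periodo_em_pe", ("Síncope Vasovagal (Reflexa)", 3)), ("ambiente_quente_fechado", ("Síncope Vasovagal (Reflexa)", 2)), ("nausea_sudorese_palidez", ("Síncope Vasovagal (Reflexa)", 3)), ("visao_turva_ou_escura", ("Síncope Vasovagal (Reflexa)", 2)), ("ocorre_apos_miccao_tossir", ("Síncope Vasovagal (Reflexa)", 2)), ("ocorre_ao_levantar_se", ("Síncope por Hipotensão Ortostática", 4)), ("tontura_imediata_ao_levantar", ("Síncope por Hipotensão Ortostática", 3)), ("uso_de_medicacao_pressao", ("Síncope por Hipotensão Ortostática", 2)), ("desidratacao_recente", ("Síncope por Hipotensão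 Ortostática", 2)), ("comum_em_idosos", ("Síncope por Hipotensão Ortostática", 1)), ("durante_exercicio_fisico", ("Síncope Cardíaca", 4)), ("palpitacoes_antes_desmaio", ("Síncope Cardíaca", 3)), ("dor_no_peito_associada", ("Síncope Cardíaca", 3)), ("desmaio_subito_sem_aviso", ("Síncope Cardíaca", 4)), ("ocorreu_deitado", ("Síncope Cardíaca", 3)), ("historico_familiar_morte_subita", ("Síncope Cardíaca", 3)), ("doenca_cardiaca_conhecida", ("Síncope Cardíaca", 2))] := by rfl
lemma pvStep_eq (sc : PySem.Dict String Int) (s : String) : pvStepA sc s = pvStepB sc s := by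
  by_cases h0 : s = "gatilho_emocional"
  · subst h0; rfl
  by_cases h1 : s = "dor_forte_subita"
  · subst h1; rfl
  by_cases h2 : s = "longo_periodo_em_pe"
  · subst h2; rfl
  by_cases h3 : s = "ambiente_quente_fechado"
  · subst h3; rfl
  by_cases h4 : s = "nausea_sudorese_palidez"
  · subst h4; rfl
  by_cases h5 : s = "visao_turva_ou_escura"
  · subst h5; rfl
  by_cases h6 : s = "ocorre_apos_miccao_tossir"
  · subst h6; rfl
  by_cases h7 : s = "ocorre_ao_levantar_se"
  · subst h7; rfl
  by_cases h8 : s = "tontura_imediata_ao_levantar"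
  · subst h8; rfl
  by_cases h9 : s = "uso_de_medicacao_pressao"
  · subst h9; rfl
  by_cases h10 : s = "desidratacao_recente"
  · subst h10; rfl
  by_cases h11 : s = "comum_em_idosos"
  · subst h11; rfl
  by_cases h12 : s = "durante_exercicio_fisico"
  · subst h12; rfl
  by_cases h13 : s = "palpitacoes_antes_desmaio"
  · subst h13; rfl
  by_cases h14 : s = "dor_no_peito_associada"
  · subst h14; rfl
  by_cases h15 : s = "desmaio_subito_sem_aviso"
  · subst h15; rfl
  by_cases h16 : s = "ocorreu_deitado"
  · subst h16; rfl
  by_cases h17 : s = "historico_familiar_morte_subita"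
  · subst h17; rfl
  by_cases h18 : s = "doenca_cardiaca_conhecida"
  · subst h18; rfl
  have hA : pvStepA sc s = sc := by
    simp [pvStepA, pvDiagRules, pvVaso_mk, pvOrto_mk, pvCard_mk, PySem.Dict.contains_mk,
      Ne.symm h0, Ne.symm h1, Ne.symm h2, Ne.symm h3, Ne.symm h4, Ne.symm h5, Ne.symm h6, Ne.symm h7, Ne.symm h8, Ne.symm h9, Ne.symm h10, Ne.symm h11, Ne.symm h12, Ne.symm h13, Ne.symm h14, Ne.symm h15, Ne.symm h16, Ne.symm h17, Ne.symm h18]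
  have hB : pvStepB sc s = sc := by
    simp [pvStepB, pvIdx_mk, PySem.Dict.get?,
      Ne.symm h0, Ne.symm h1, Ne.symm h2, Ne.symm h3, Ne.symm h4, Ne.symm h5, Ne.symm h6, Ne.symm h7, Ne.symm h8, Ne.symm h9, Ne.symm h10, Ne.symm h11, Ne.symm h12, Ne.symm h13, Ne.symm h14, Ne.symm h15, Ne.symm h16, Ne.symm h17, Ne.symm h18]
  rw [hA, hB]

lemma pvScores_shape (xs : List String) : ∀ (a b c : Int),
    ∃ a' b' c', xs.foldl pvStepB (PySem.Dict.mk
      [("Síncope Vasovagal (Reflexa)", a), ("Síncope por Hipotensão Ortostática", b),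
       ("Síncope Cardíaca", c)]) = PySem.Dict.mk
      [("Síncope Vasovagal (Reflexa)", a'), ("Síncope por Hipotensão Ortostática", b'),
       ("Síncope Cardíaca", c')] := by
  induction xs with
  | nil => exact fun a b c => ⟨a, b, c, rfl⟩
  | cons s xs ih =>
    intro a b c
    simp only [List.foldl_cons]
    rcases hget : pvSymptomIndex.get? s with _ | ⟨t, w⟩
    · have : pvStepB (PySem.Dict.mk
        [("Síncope Vasovagal (Reflexa)", a), ("Síncope por Hipotensão Ortostática", b),
         ("Síncope Cardíaca", c)]) s = PySem.Dict.mk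
        [("Síncope Vasovagal (Reflexa)", a), ("Síncope por Hipotensão Ortostática", b),
         ("Síncope Cardíaca", c)] := by simp [pvStepB, hget]
      rw [this]; exact ih a b c
    · have hm := PySem.Dict.mem_items_of_get?_eq_some _ hget
      rw [pvIdx_mk] at hm
      have hstep : pvStepB (PySem.Dict.mk
        [("Síncope Vasovagal (Reflexa)", a), ("Síncope por Hipotensão Ortostática", b),
         ("Síncope Cardíaca", c)]) s = (PySem.Dict.mk
        [("Síncope Vasovagal (Reflexa)", a), ("Síncope por Hipotensão Ortostática", b),
         ("Síncope Cardíaca", c)]).modify t 0 (fun v => v + w) := by simp [pvStepB, hget]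
      rw [hstep]
      fin_cases hm <;> exact ih _ _ _

lemma pvTail_eq (a b c : Int) :
    (let scores := PySem.Dict.mk
      [("Síncope Vasovagal (Reflexa)", a), ("Síncope por Hipotensão Ortostática", b),
       ("Síncope Cardíaca", c)]
     let maxScore := match PySem.List.max? scores.values (fun v => v) with
       | some m => m
       | none => 0
     if maxScore = 0 then (("Inconclusivo com base nos sintomas fornecidos." : String), (0 : Int))
     else
       match PySem.List.max? scores.keys (fun k => scores.getD k 0) with
       | some t => (t, maxScore)
       | none => ("", maxScore)) =
    (let scores := PySem.Dict.mk
      [("Síncope Vasovagal (Reflexa)", a), ("Síncope por Hipotensão Ortostática", b),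
       ("Síncope Cardíaca", c)]
     match PySem.List.max? scores.items (fun kv => kv.2) with
     | some (t, m) => if m = 0 then ("Inconclusivo com base nos sintomas fornecidos.", 0) else (t, m)
     | none => ("", 0)) := by
  by_cases h1 : a < b <;> by_cases h2 : b < c <;> by_cases h3 : a < c <;>
    simp_all [PySem.List.max?, PySem.Dict.values, PySem.Dict.keys,
      PySem.Dict.getD, PySem.Dict.get?] <;>
    split_ifs <;> simp_all
  all_goals (split_ifs <;> simp_all)

theorem diagnosis_syncope_spec : Claim_equal_diagnosis_syncope := by
  intro xs _
  unfold Spec_diagnosis_syncope diagnosis_syncope diagnosis_syncope_alt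
  by_cases hxs : xs = []
  · simp [hxs]
  · have hfn : pvStepA = pvStepB := funext fun sc => funext fun s => pvStep_eq sc s
    obtain ⟨a, b, c, hsc⟩ := pvScores_shape xs 0 0 0
    have h0 : (PySem.Dict.ofList
        [("Síncope Vasovagal (Reflexa)", (0 : Int)),
         ("Síncope por Hipotensão Ortostática", 0), ("Síncope Cardíaca", 0)]) = PySem.Dict.mk
        [("Síncope Vasovagal (Reflexa)", (0 : Int)),
         ("Síncope por Hipotensão Ortostática", 0), ("Síncope Cardíaca", 0)] := rfl
    simp only [if_neg hxs, hfn, h0, hsc]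
    exact pvTail_eq a b c
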